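-- pv_equiv track=rewrite | github.com/CVMI-Lab/clip-beyond-tail | concept_freq_utils/calc_word_frequency.py | calc_frequency
-- ===== SOURCE A (Python) =====
-- def calc_frequency(all_tokens, template):
--     count = 0
--     for tokens in all_tokens:
--         # Check existance in one text
--         for _t in template:
--             if all(_w in tokens for _w in _t):
--                 count += 1
--                 break
--     return count
-- ===== SOURCE B (Python) =====
-- def calc_frequency(all_tokens, template):
--     matched = set()
--     for _t in template:
--         matched |= {i for i, tokens in enumerate(all_tokens)
--                     if all(_w in tokens for _w in _t)}
--     return len(matched)
-- ===== Notes on version B (the rewrite author's own statement) =====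
-- stated objective: alternative
-- what changed: B inverts the loop nesting: it iterates templates on the outside, builds for each template the set of matching text indices, unions these sets (the union deduplication replacing A's per-text break) and returns the size of the union.
import Mathlib
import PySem

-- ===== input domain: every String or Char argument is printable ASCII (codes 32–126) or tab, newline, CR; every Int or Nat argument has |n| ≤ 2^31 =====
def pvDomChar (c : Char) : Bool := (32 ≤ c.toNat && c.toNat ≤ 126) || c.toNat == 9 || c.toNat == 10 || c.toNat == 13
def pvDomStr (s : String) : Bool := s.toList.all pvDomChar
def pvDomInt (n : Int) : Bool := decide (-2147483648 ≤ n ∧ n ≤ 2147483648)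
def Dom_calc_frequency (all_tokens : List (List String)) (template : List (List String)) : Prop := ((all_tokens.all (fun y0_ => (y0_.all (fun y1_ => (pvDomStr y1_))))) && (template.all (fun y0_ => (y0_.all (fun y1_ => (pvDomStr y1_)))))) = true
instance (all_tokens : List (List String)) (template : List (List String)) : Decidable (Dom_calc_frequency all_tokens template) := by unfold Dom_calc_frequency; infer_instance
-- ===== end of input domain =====

-- B swaps the loop nesting: templates on the outside, unioning per-template sets of matching
-- text indices instead of A's per-text break (objective: alternative, same cost).

-- ===== PORT A =====
-- A's inner 'for _t in template: if all(...): count += 1; break'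
def calcInnerA (tokens : List String) : List (List String) → Int
  | [] => 0
  | t :: rest => if t.all (fun w => tokens.contains w) then 1 else calcInnerA tokens rest

def calc_frequency (all_tokens : List (List String)) (template : List (List String)) : Int :=
  all_tokens.foldl (fun count tokens => count + calcInnerA tokens template) 0

-- ===== PORT B =====
-- the set comprehension '{i for i, tokens in enumerate(all_tokens) if all(_w in tokens for _w in _t)}'
def pvCand (all_tokens : List (List String)) (t : List String) : List Int :=
  ((PySem.List.enumerate all_tokens 0).filter
      (fun p => t.all (fun w => p.2.contains w))).map (·.1)

def calc_frequency_alt (all_tokens : List (List String)) (template : List (List String)) : Int :=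
  let matched : PySem.Set Int :=
    template.foldl
      (fun m t => PySem.Set.union m (PySem.Set.ofList (pvCand all_tokens t)))
      PySem.Set.empty
  (matched.length : Int)

-- ===== PRECONDITION & SPEC =====
def Spec_calc_frequency (all_tokens : List (List String)) (template : List (List String)) (out : Int) : Prop := out = calc_frequency_alt all_tokens template
instance (all_tokens : List (List String)) (template : List (List String)) (out : Int) : Decidable (Spec_calc_frequency all_tokens template out) := by unfold Spec_calc_frequency; infer_instance

-- ===== CLAIM (what is proved, stated in full; the proofs are below) =====
def Claim_equal_calc_frequency : Prop := ∀ (all_tokens : List (List String)) (template : List (List String)), Dom_calc_frequency all_tokens template → Spec_calc_frequency all_tokens template (calc_frequency all_tokens template)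

-- ===== LEMMAS AND PROOFS =====

-- the per-text predicate "some sub-template is fully contained"
def pvQ (template : List (List String)) (tokens : List String) : Bool :=
  template.any (fun t => t.all (fun w => tokens.contains w))

lemma calcInnerA_eq (tokens : List String) (template : List (List String)) :
    calcInnerA tokens template = if pvQ template tokens then 1 else 0 := by
  induction template with
  | nil => simp [calcInnerA, pvQ]
  | cons t rest ih =>
    by_cases h : t.all (fun w => tokens.contains w)
    · have hq : pvQ (t :: rest) tokens = true := by
        simp only [pvQ, List.any_cons, h, Bool.true_or]
      unfold calcInnerA
      rw [if_pos h, hq, if_pos rfl]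
    · have h' : ¬ ∀ x ∈ t, x ∈ tokens := by simpa using h
      simp [calcInnerA, pvQ, h', ih]

lemma calcA_eq_countP (all_tokens template : List (List String)) :
    calc_frequency all_tokens template = (all_tokens.countP (pvQ template) : Int) := by
  unfold calc_frequency
  induction all_tokens using List.reverseRecOn with
  | nil => simp
  | append_singleton xs x ih =>
    rw [List.foldl_append, List.foldl_cons, List.foldl_nil, ih, calcInnerA_eq,
      List.countP_append]
    by_cases h : pvQ template x <;>
      simp [h, List.countP_nil]

lemma mem_pvCand (all_tokens : List (List String)) (t : List String) (x : Int) :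
    x ∈ pvCand all_tokens t ↔
      ∃ (k : Nat) (h : k < all_tokens.length),
        x = (k : Int) ∧ t.all (fun w => (all_tokens[k]).contains w) := by
  unfold pvCand
  simp only [List.mem_map, List.mem_filter, PySem.List.mem_enumerate_iff]
  constructor
  · rintro ⟨p, ⟨⟨k, hk, rfl⟩, hp⟩, rfl⟩
    exact ⟨k, hk, by simp, by simpa using hp⟩
  · rintro ⟨k, hk, rfl, h⟩
    exact ⟨(0 + (k : Int), all_tokens[k]), ⟨⟨k, hk, rfl⟩, by simpa using h⟩, by simp⟩

lemma mem_foldl_union {α : Type} [BEq α] [LawfulBEq α] (l : List (List String))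
    (f : List String → List α) (m : PySem.Set α) (x : α) :
    x ∈ l.foldl (fun m t => PySem.Set.union m (PySem.Set.ofList (f t))) m ↔
      x ∈ m ∨ ∃ t ∈ l, x ∈ f t := by
  induction l generalizing m with
  | nil => simp
  | cons t rest ih =>
    rw [List.foldl_cons, ih]
    simp only [PySem.Set.mem_union, PySem.Set.mem_ofList, List.mem_cons]
    constructor
    · rintro (⟨hm | hf⟩ | ⟨u, hu, hx⟩)
      · exact Or.inl hm
      · exact Or.inr ⟨t, Or.inl rfl, hf⟩
      · exact Or.inr ⟨u, Or.inr hu, hx⟩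
    · rintro (hm | ⟨u, (rfl | hu), hx⟩)
      · exact Or.inl (Or.inl hm)
      · exact Or.inl (Or.inr hx)
      · exact Or.inr ⟨u, hu, hx⟩

lemma nodup_foldl_union {α : Type} [BEq α] [LawfulBEq α] (l : List (List String))
    (f : List String → List α) (m : PySem.Set α) (hm : m.Nodup) :
    (l.foldl (fun m t => PySem.Set.union m (PySem.Set.ofList (f t))) m).Nodup := by
  induction l generalizing m with
  | nil => exact hm
  | cons t rest ih => exact ih _ (PySem.Set.nodup_union _ _ hm)

-- reference list: indices of matching texts, in order
def pvRef (all_tokens template : List (List String)) : List Int :=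
  ((PySem.List.enumerate all_tokens 0).filter (fun p => pvQ template p.2)).map (·.1)

lemma mem_pvRef (all_tokens template : List (List String)) (x : Int) :
    x ∈ pvRef all_tokens template ↔
      ∃ (k : Nat) (h : k < all_tokens.length),
        x = (k : Int) ∧ pvQ template all_tokens[k] := by
  unfold pvRef
  simp only [List.mem_map, List.mem_filter, PySem.List.mem_enumerate_iff]
  constructor
  · rintro ⟨p, ⟨⟨k, hk, rfl⟩, hp⟩, rfl⟩
    exact ⟨k, hk, by simp, by simpa using hp⟩
  · rintro ⟨k, hk, rfl, h⟩
    exact ⟨(0 + (k : Int), all_tokens[k]), ⟨⟨k, hk, rfl⟩, by simpa using h⟩, by simp⟩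

lemma nodup_pvRef (all_tokens template : List (List String)) :
    (pvRef all_tokens template).Nodup := by
  unfold pvRef
  have h := (PySem.List.pairwise_lt_enumerate all_tokens 0).filter
      (fun p => pvQ template p.2)
  exact ((List.pairwise_map.mpr (h.imp (fun hlt => hlt))).imp (fun hlt => ne_of_lt hlt))

lemma length_pvRef (all_tokens template : List (List String)) :
    (pvRef all_tokens template).length = all_tokens.countP (pvQ template) := by
  unfold pvRef
  rw [List.length_map, ← List.countP_eq_length_filter]
  have h : (PySem.List.enumerate all_tokens 0).countP (fun p => pvQ template p.2)
      = ((PySem.List.enumerate all_tokens 0).map (·.2)).countP (pvQ template) := by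
    rw [List.countP_map]; rfl
  rw [h, PySem.List.map_snd_enumerate]

lemma calcB_eq_countP (all_tokens template : List (List String)) :
    calc_frequency_alt all_tokens template = (all_tokens.countP (pvQ template) : Int) := by
  unfold calc_frequency_alt
  have hperm :
      (template.foldl
        (fun m t => PySem.Set.union m (PySem.Set.ofList (pvCand all_tokens t)))
        PySem.Set.empty).Perm (pvRef all_tokens template) := by
    have hA := nodup_foldl_union template (pvCand all_tokens) PySem.Set.empty
      (by unfold PySem.Set.empty; exact List.nodup_nil)
    rw [List.perm_ext_iff_of_nodup hA (nodup_pvRef all_tokens template)]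
    intro x
    rw [mem_foldl_union template (pvCand all_tokens), mem_pvRef]
    simp only [PySem.Set.empty, List.not_mem_nil, false_or]
    constructor
    · rintro ⟨t, ht, hx⟩
      rcases (mem_pvCand all_tokens t x).mp hx with ⟨k, hk, rfl, h⟩
      refine ⟨k, hk, rfl, ?_⟩
      simp only [pvQ, List.any_eq_true]
      exact ⟨t, ht, h⟩
    · rintro ⟨k, hk, rfl, h⟩
      simp only [pvQ, List.any_eq_true] at h
      rcases h with ⟨t, ht, h⟩
      exact ⟨t, ht, (mem_pvCand all_tokens t _).mpr ⟨k, hk, rfl, h⟩⟩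
  simp only [hperm.length_eq, length_pvRef]

-- ===== VERDICT (by name: the statement is the Claim_ definition above) =====
theorem calc_frequency_spec : Claim_equal_calc_frequency := by
  intro all_tokens template _
  unfold Spec_calc_frequency
  rw [calcA_eq_countP, calcB_eq_countP]
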